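-- pv_equiv track=rewrite | github.com/Shahzaib-Rafi789/Library-Management-System | Backend/SORTING ALGORITHMS/funcs-Descending.py | Strand
-- ===== SOURCE A (Python) =====
-- def Strand(arr):
--
--     #while (len(arr) > 0):
--     #    subarr = [arr.pop(0)]
--
--     i=0
--     subarr =[arr.pop(0)]
--     while (i < len(arr)):
--         if (arr[i] < subarr[-1]):
--             subarr.append(arr.pop(i))
--         else:
--             i += 1
--
--     return subarr
-- ===== SOURCE B (Python) =====
-- def Strand(arr):
--     # Single linear pass: split into the decreasing strand and the remainder,
--     # then reassign arr to the remainder (same observable mutation as A).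
--     last = arr[0]
--     strand = [last]
--     rem = []
--     for x in arr[1:]:
--         if x < last:
--             strand.append(x)
--             last = x
--         else:
--             rem.append(x)
--     arr[:] = rem
--     return strand
-- ===== Notes on version B (the rewrite author's own statement) =====
-- stated objective: faster
-- what changed: Replaces the index-scan loop with repeated arr.pop(i) (each pop shifts the tail) by one linear pass that partitions the list into the strand and the remainder while tracking the strand's last element, then reassigns arr to the remainder (same mutation as A).
-- outside the precondition, e.g. on Strand([]): A raises IndexError, B raises IndexError
import Mathlib
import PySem

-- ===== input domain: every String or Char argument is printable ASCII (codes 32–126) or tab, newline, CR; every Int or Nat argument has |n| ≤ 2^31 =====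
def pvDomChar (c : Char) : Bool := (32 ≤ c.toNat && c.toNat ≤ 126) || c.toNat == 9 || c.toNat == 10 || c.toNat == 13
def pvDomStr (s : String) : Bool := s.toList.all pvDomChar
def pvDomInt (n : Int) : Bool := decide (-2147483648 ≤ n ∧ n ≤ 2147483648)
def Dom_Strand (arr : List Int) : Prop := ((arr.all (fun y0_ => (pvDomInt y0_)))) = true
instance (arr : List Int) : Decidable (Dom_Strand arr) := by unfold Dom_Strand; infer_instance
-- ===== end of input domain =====

-- B replaces A's quadratic pop(i)-scan by one linear partitioning pass tracking the strand's last
-- element; both mutate the Python argument to the remainder identically, the theorems are about the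
-- return value.

-- ===== PORT A =====
-- A's while loop: state (arr, subarr, i); arr.pop(i) at a valid index = (arr[i], arr.eraseIdx i).
def StrandLoopA (arr subarr : List Int) (i : Nat) : List Int :=
  if h : i < arr.length then
    if arr[i] < PySem.List.pyGetD subarr (-1) 0 then   -- subarr[-1]; subarr is never empty in A
      StrandLoopA (arr.eraseIdx i) (subarr ++ [arr[i]]) i
    else
      StrandLoopA arr subarr (i + 1)
  else subarr
termination_by arr.length - i
decreasing_by
  · have : (arr.eraseIdx i).length = arr.length - 1 := by
      simp [List.length_eraseIdx, h]
    omega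
  · omega

def Strand (arr : List Int) : List Int :=
  match arr with
  | [] => []                 -- Python: arr.pop(0) raises IndexError; excluded by Pre_Strand
  | x :: rest => StrandLoopA rest [x] 0

-- ===== PORT B =====
def Strand_alt (arr : List Int) : List Int :=
  match arr with
  | [] => []                 -- Python: arr[0] raises IndexError; excluded by Pre_Strand
  | x :: rest =>
    -- the for loop: state = (strand, rem, last)
    (rest.foldl
      (fun s y =>
        if y < s.2.2 then (s.1 ++ [y], s.2.1, y) else (s.1, s.2.1 ++ [y], s.2.2))
      ([x], ([], x))).1

-- ===== PRECONDITION & SPEC =====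
-- Pre_ excludes only the empty list, on which A raises IndexError (pop from empty list).
def Pre_Strand (arr : List Int) : Prop := arr ≠ []
instance (arr : List Int) : Decidable (Pre_Strand arr) := by unfold Pre_Strand; infer_instance
def pvWitness_Strand : List Int := ([3, 1, 4, 1, 5] : List Int)

def Spec_Strand (arr : List Int) (out : List Int) : Prop := out = Strand_alt arr
instance (arr : List Int) (out : List Int) : Decidable (Spec_Strand arr out) := by unfold Spec_Strand; infer_instance

-- ===== CLAIM (what is proved, stated in full; the proofs are below) =====
def Claim_equal_Strand : Prop := ∀ (arr : List Int), Dom_Strand arr → Pre_Strand arr → Spec_Strand arr (Strand arr)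

-- ===== LEMMAS AND PROOFS =====

-- Proof-side characterisation: the strand extracted from a list given the current last element.
def extractStrand : List Int → Int → List Int
  | [], _ => []
  | y :: ys, l => if y < l then y :: extractStrand ys y else extractStrand ys l

theorem strandLoopA_eq (arr subarr : List Int) (i : Nat) :
    StrandLoopA arr subarr i =
      subarr ++ extractStrand (arr.drop i) (PySem.List.pyGetD subarr (-1) 0) := by
  induction arr, subarr, i using StrandLoopA.induct with
  | case1 arr subarr i h hlt ih =>
      rw [StrandLoopA, dif_pos h, if_pos hlt, ih]
      have hdrop : arr.drop i = arr[i] :: arr.drop (i + 1) := List.drop_eq_getElem_cons h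
      have herase : (arr.eraseIdx i).drop i = arr.drop (i + 1) := by
        rw [List.eraseIdx_eq_take_drop_succ]
        exact List.drop_left' (List.length_take_of_le (le_of_lt h))
      rw [herase, hdrop, extractStrand, if_pos hlt,
          PySem.List.pyGetD_neg_one_append_singleton, List.append_assoc]
      simp
  | case2 arr subarr i h hge ih =>
      rw [StrandLoopA, dif_pos h, if_neg hge, ih]
      have hdrop : arr.drop i = arr[i] :: arr.drop (i + 1) := List.drop_eq_getElem_cons h
      rw [hdrop, extractStrand, if_neg hge]
  | case3 arr subarr i h =>
      rw [StrandLoopA, dif_neg h]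
      rw [List.drop_eq_nil_of_le (by omega), extractStrand]
      simp

theorem foldB_fst (rest : List Int) : ∀ (s r : List Int) (l : Int),
    (rest.foldl
      (fun s y =>
        if y < s.2.2 then (s.1 ++ [y], s.2.1, y) else (s.1, s.2.1 ++ [y], s.2.2))
      (s, (r, l))).1 = s ++ extractStrand rest l := by
  induction rest with
  | nil => intro s r l; simp [extractStrand]
  | cons y ys ih =>
      intro s r l
      simp only [List.foldl_cons, extractStrand]
      by_cases hy : y < l
      · simp only [hy, if_pos, ih, List.append_assoc, List.singleton_append]
      · simp only [hy, if_neg, not_false_iff, ih]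

-- ===== VERDICT (by name: the statement is the Claim_ definition above) =====
theorem Strand_spec : Claim_equal_Strand := by
  intro arr _ hpre
  unfold Spec_Strand
  match arr with
  | [] => exact absurd rfl hpre
  | x :: rest =>
      show StrandLoopA rest [x] 0 =
        ((rest.foldl
          (fun s y =>
            if y < s.2.2 then (s.1 ++ [y], s.2.1, y) else (s.1, s.2.1 ++ [y], s.2.2))
          ([x], ([], x))).1)
      rw [strandLoopA_eq, foldB_fst]
      simp [PySem.List.pyGetD, PySem.List.pyGet?, PySem.List.pyIdx?]
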